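-- pv_equiv track=rewrite | github.com/vulpicastor/advent-of-code-2020 | src/23.py | step_game
-- ===== SOURCE A (Python) =====
-- def step_game(cups):
--     choose_cup = cups[0]
--     min_cup = min(cups[4:])
--     insert_cup = choose_cup - 1 if choose_cup-1 >= min_cup else max(cups[4:])
--     while True:
--         try:
--             insert_after = cups.index(insert_cup, 4)
--             break
--         except ValueError:
--             insert_cup -= 1
--             continue
--     new_cups = cups[4:insert_after+1]
--     new_cups.extend(cups[1:4])
--     new_cups.extend(cups[insert_after+1:])
--     new_cups.append(choose_cup)
--     return new_cups
-- ===== SOURCE B (Python) =====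
-- def step_game(cups):
--     choose_cup = cups[0]
--     rest = cups[4:]
--     lower = [c for c in rest if c < choose_cup]
--     target = max(lower) if lower else max(rest)
--     i = rest.index(target)
--     return rest[:i+1] + cups[1:4] + rest[i+1:] + [choose_cup]
-- ===== Notes on version B (the rewrite author's own statement) =====
-- stated objective: alternative
-- what changed: B computes the destination cup in one selecting pass (max of the cups below the current cup, else max of the rest) instead of A's decrement-and-rescan while/try loop over candidate labels.
-- outside the precondition, e.g. on step_game([]): A raises IndexError, B raises IndexError
import Mathlib
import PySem

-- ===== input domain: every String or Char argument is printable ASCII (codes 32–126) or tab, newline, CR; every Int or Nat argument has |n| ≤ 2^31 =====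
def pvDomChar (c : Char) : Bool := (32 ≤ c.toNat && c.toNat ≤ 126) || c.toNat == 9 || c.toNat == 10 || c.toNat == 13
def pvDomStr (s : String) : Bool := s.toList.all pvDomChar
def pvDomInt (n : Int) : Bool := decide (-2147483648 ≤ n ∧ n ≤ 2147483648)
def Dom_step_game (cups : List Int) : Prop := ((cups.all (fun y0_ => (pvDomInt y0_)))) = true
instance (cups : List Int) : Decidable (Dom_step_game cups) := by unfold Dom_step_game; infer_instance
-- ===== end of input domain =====

-- B picks the destination cup with one selecting pass (max of the cups below the current cup)
-- instead of A's decrement-and-rescan loop; same return value on all lists of length ≥ 5.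

-- ===== PORT A =====
-- A's 'while True: try cups.index(insert_cup, 4) … except: insert_cup -= 1' loop; the fuel
-- argument is only a totality guard (within Pre_ the start value is enough fuel, proved below).
def findLoopA (rest : List Int) : Int → Nat → Option Nat
  | _, 0 => none
  | v, fuel+1 =>
    match PySem.List.index? rest v with
    | some i => some i
    | none => findLoopA rest (v-1) fuel

def step_game (cups : List Int) : List Int :=
  match PySem.List.pyGet? cups 0 with
  | none => []  -- IndexError, excluded by Pre_
  | some choose_cup =>
    match PySem.List.min? (PySem.List.slice cups (some 4) none) (fun x => x) with
    | none => []  -- ValueError from min([]), excluded by Pre_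
    | some min_cup =>
      let insert_cup : Int :=
        if choose_cup - 1 ≥ min_cup then choose_cup - 1
        else (PySem.List.max? (PySem.List.slice cups (some 4) none) (fun x => x)).getD 0
      match findLoopA (PySem.List.slice cups (some 4) none) insert_cup
              ((insert_cup - min_cup).toNat + 1) with
      | none => []  -- unreachable within Pre_
      | some i =>
        PySem.List.slice cups (some 4) (some ((i : Int) + 4 + 1))
          ++ PySem.List.slice cups (some 1) (some 4)
          ++ PySem.List.slice cups (some ((i : Int) + 4 + 1)) none
          ++ [choose_cup]

-- ===== PORT B =====
def step_game_alt (cups : List Int) : List Int :=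
  match PySem.List.pyGet? cups 0 with
  | none => []  -- IndexError
  | some choose_cup =>
    let rest := PySem.List.slice cups (some 4) none
    let lower := rest.filter (fun c => decide (c < choose_cup))
    match (if lower.isEmpty then PySem.List.max? rest (fun x => x)
           else PySem.List.max? lower (fun x => x)) with
    | none => []  -- ValueError from max([])
    | some target =>
      match PySem.List.index? rest target with
      | none => []  -- unreachable: target ∈ rest
      | some i =>
        PySem.List.slice rest none (some ((i : Int) + 1))
          ++ PySem.List.slice cups (some 1) (some 4)
          ++ PySem.List.slice rest (some ((i : Int) + 1)) none
          ++ [choose_cup]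

-- ===== PRECONDITION & SPEC =====
-- Pre_ excludes exactly the inputs where Python A raises: cups = [] (IndexError on cups[0])
-- and 1 ≤ len(cups) ≤ 4 (ValueError from min(cups[4:]) on the empty list).
def Pre_step_game (cups : List Int) : Prop := 5 ≤ cups.length
instance (cups : List Int) : Decidable (Pre_step_game cups) := by unfold Pre_step_game; infer_instance

def pvWitness_step_game : List Int := [3, 8, 9, 1, 2, 5, 4, 6, 7]

def Spec_step_game (cups : List Int) (out : List Int) : Prop := out = step_game_alt cups
instance (cups : List Int) (out : List Int) : Decidable (Spec_step_game cups out) := by unfold Spec_step_game; infer_instance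

-- ===== CLAIM (what is proved, stated in full; the proofs are below) =====
def Claim_equal_step_game : Prop := ∀ (cups : List Int), Dom_step_game cups → Pre_step_game cups → Spec_step_game cups (step_game cups)

-- ===== LEMMAS AND PROOFS =====

-- A's decrement loop, started at v with no element of rest strictly between t and v
-- (t = the largest element of rest below choose_cup), stops exactly at t.
theorem findLoopA_finds : ∀ (fuel : Nat) (rest : List Int) (choose t v : Int),
    t ∈ rest → t < choose → (∀ w ∈ rest, w < choose → w ≤ t) →
    t ≤ v → v ≤ choose - 1 → (v - t).toNat < fuel →
    findLoopA rest v fuel = PySem.List.index? rest t := by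
  intro fuel
  induction fuel with
  | zero => intro rest choose t v _ _ _ _ _ h; omega
  | succ n ih =>
    intro rest choose t v ht htc hub htv hvc hfuel
    unfold findLoopA
    cases h : PySem.List.index? rest v with
    | some i =>
      have hv : v ∈ rest := (PySem.List.index?_isSome_iff rest v).mp (by rw [h]; rfl)
      have hvt : v = t := le_antisymm (hub v hv (by omega)) htv
      subst hvt
      simp only [h]
    | none =>
      have hv : v ∉ rest := (PySem.List.index?_eq_none_iff rest v).mp h
      have hne : t ≠ v := fun e => hv (e ▸ ht)
      have : t ≤ v - 1 := by omega
      exact ih rest choose t (v - 1) ht htc hub this (by omega) (by omega)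

theorem step_game_spec' : ∀ (cups : List Int), Pre_step_game cups →
    step_game cups = step_game_alt cups := by
  intro cups hpre
  unfold Pre_step_game at hpre
  -- cups[0]
  obtain ⟨c, hc⟩ : ∃ c, cups[0]? = some c := by
    cases h : cups[0]? with
    | none => rw [List.getElem?_eq_none_iff] at h; omega
    | some c => exact ⟨c, rfl⟩
  have hget : PySem.List.pyGet? cups (0 : Int) = some c := by
    have : ((0 : Nat) : Int) = (0 : Int) := by norm_num
    rw [← this, PySem.List.pyGet?_natCast]; exact hc
  -- rest = cups.drop 4
  have hslice4 : PySem.List.slice cups (some (4 : Int)) none = cups.drop 4 := by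
    rw [PySem.List.slice_from cups (by norm_num : (0:Int) ≤ 4)]
    rfl
  set rest := cups.drop 4 with hrest
  have hrlen : rest.length = cups.length - 4 := by simp [hrest]
  have hrne : rest ≠ [] := by
    intro h; rw [h] at hrlen; simp at hrlen; omega
  -- min of rest
  obtain ⟨m, hm⟩ : ∃ m, PySem.List.min? rest (fun x => x) = some m := by
    cases h : PySem.List.min? rest (fun x => x) with
    | none => exact absurd ((PySem.List.min?_eq_none_iff rest _).mp h) hrne
    | some m => exact ⟨m, rfl⟩
  have hm_mem : m ∈ rest := PySem.List.min?_mem hm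
  have hm_min : ∀ y ∈ rest, m ≤ y := by
    intro y hy; exact PySem.List.min?_isMin hm y hy
  set lower := rest.filter (fun x => decide (x < c)) with hlower
  unfold step_game step_game_alt
  simp only [hget, hslice4, hm, ← hlower]
  by_cases hle : lower.isEmpty
  · -- no cup below c: both take max of rest
    have hnone : ∀ w ∈ rest, ¬ (w < c) := by
      intro w hw hwc
      have : w ∈ lower := by
        rw [hlower]; simp [List.mem_filter, hw, hwc]
      rw [List.isEmpty_iff] at hle; simp [hle] at this
    have hcm : ¬ (c - 1 ≥ m) := by
      have := hnone m hm_mem; omega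
    obtain ⟨M, hM⟩ : ∃ M, PySem.List.max? rest (fun x => x) = some M := by
      cases h : PySem.List.max? rest (fun x => x) with
      | none => exact absurd ((PySem.List.max?_eq_none_iff rest _).mp h) hrne
      | some M => exact ⟨M, rfl⟩
    have hM_mem : M ∈ rest := PySem.List.max?_mem hM
    obtain ⟨i, hi⟩ : ∃ i, PySem.List.index? rest M = some i := by
      cases h : PySem.List.index? rest M with
      | none =>
        have := (PySem.List.index?_eq_none_iff rest M).mp h
        exact absurd hM_mem this
      | some i => exact ⟨i, rfl⟩
    rw [if_pos hle, if_neg hcm, hM]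
    simp only [Option.getD_some]
    have : findLoopA rest M ((M - m).toNat + 1) = some i := by
      unfold findLoopA; rw [hi]
    -- identical assembly
    have e1 : PySem.List.slice cups (some (4 : Int)) (some ((i : Int) + 4 + 1))
        = PySem.List.slice rest none (some ((i : Int) + 1)) := by
      rw [PySem.List.slice_toNat cups (by norm_num : (0:Int) ≤ 4) (by positivity : (0:Int) ≤ (i : Int) + 4 + 1),
          PySem.List.slice_to rest (by positivity : (0:Int) ≤ (i : Int) + 1), hrest]
      have h1 : ((i : Int) + 4 + 1).toNat = i + 5 := by omega
      have h2 : ((i : Int) + 1).toNat = i + 1 := by omega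
      have h3 : (4 : Int).toNat = 4 := rfl
      rw [h1, h2, h3]
      congr 1
    have e2 : PySem.List.slice cups (some ((i : Int) + 4 + 1)) none
        = PySem.List.slice rest (some ((i : Int) + 1)) none := by
      rw [PySem.List.slice_from cups (by positivity : (0:Int) ≤ (i : Int) + 4 + 1),
          PySem.List.slice_from rest (by positivity : (0:Int) ≤ (i : Int) + 1), hrest,
          List.drop_drop]
      have h1 : ((i : Int) + 4 + 1).toNat = i + 5 := by omega
      rw [h1]
      congr 1
      omega
    simp only [this, hi, e1, e2]
  · -- some cup below c: the loop from c-1 stops at max lower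
    have hlne : lower ≠ [] := by simpa [List.isEmpty_iff] using hle
    obtain ⟨t, ht⟩ : ∃ t, PySem.List.max? lower (fun x => x) = some t := by
      cases h : PySem.List.max? lower (fun x => x) with
      | none => exact absurd ((PySem.List.max?_eq_none_iff lower _).mp h) hlne
      | some t => exact ⟨t, rfl⟩
    have ht_mem_l : t ∈ lower := PySem.List.max?_mem ht
    have ht_mem : t ∈ rest := (List.mem_filter.mp (hlower ▸ ht_mem_l)).1
    have ht_lt : t < c := by
      have := (List.mem_filter.mp (hlower ▸ ht_mem_l)).2; simpa using this
    have ht_max : ∀ w ∈ rest, w < c → w ≤ t := by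
      intro w hw hwc
      have : w ∈ lower := by rw [hlower]; simp [List.mem_filter, hw, hwc]
      exact PySem.List.max?_isMax ht w this
    have hcm : c - 1 ≥ m := by
      have := hm_min t ht_mem; omega
    rw [if_neg hle, if_pos hcm, ht]
    obtain ⟨i, hi⟩ : ∃ i, PySem.List.index? rest t = some i := by
      cases h : PySem.List.index? rest t with
      | none =>
        have := (PySem.List.index?_eq_none_iff rest t).mp h
        exact absurd ht_mem this
      | some i => exact ⟨i, rfl⟩
    have hloop : findLoopA rest (c - 1) ((c - 1 - m).toNat + 1)
        = PySem.List.index? rest t := by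
      refine findLoopA_finds _ rest c t (c - 1) ht_mem ht_lt ht_max (by omega) le_rfl ?_
      have := hm_min t ht_mem; omega
    have e1 : PySem.List.slice cups (some (4 : Int)) (some ((i : Int) + 4 + 1))
        = PySem.List.slice rest none (some ((i : Int) + 1)) := by
      rw [PySem.List.slice_toNat cups (by norm_num : (0:Int) ≤ 4) (by positivity : (0:Int) ≤ (i : Int) + 4 + 1),
          PySem.List.slice_to rest (by positivity : (0:Int) ≤ (i : Int) + 1), hrest]
      have h1 : ((i : Int) + 4 + 1).toNat = i + 5 := by omega
      have h2 : ((i : Int) + 1).toNat = i + 1 := by omega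
      have h3 : (4 : Int).toNat = 4 := rfl
      rw [h1, h2, h3]
      congr 1
    have e2 : PySem.List.slice cups (some ((i : Int) + 4 + 1)) none
        = PySem.List.slice rest (some ((i : Int) + 1)) none := by
      rw [PySem.List.slice_from cups (by positivity : (0:Int) ≤ (i : Int) + 4 + 1),
          PySem.List.slice_from rest (by positivity : (0:Int) ≤ (i : Int) + 1), hrest,
          List.drop_drop]
      have h1 : ((i : Int) + 4 + 1).toNat = i + 5 := by omega
      rw [h1]
      congr 1
      omega
    simp only [hloop, hi, e1, e2]

-- ===== VERDICT (by name: the statement is the Claim_ definition above) =====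
theorem step_game_spec : Claim_equal_step_game := by
  intro cups _ hpre
  unfold Spec_step_game
  exact step_game_spec' cups hpre
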